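-- pv_equiv track=rewrite | github.com/Mykeyb2004/hangbo | merge_questionnaire_workbooks.py | trim_trailing_empty_headers
-- ===== SOURCE A (Python) =====
-- def trim_trailing_empty_headers(headers: list[str]) -> tuple[str, ...]:
--     last_non_empty_index = -1
--     for index, header in enumerate(headers):
--         if header:
--             last_non_empty_index = index
--     if last_non_empty_index == -1:
--         return ()
--     return tuple(headers[: last_non_empty_index + 1])
-- ===== SOURCE B (Python) =====
-- def trim_trailing_empty_headers(headers: list[str]) -> tuple[str, ...]:
--     i = len(headers)
--     while i > 0 and not headers[i - 1]:
--         i -= 1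
--     return tuple(headers[:i])
-- ===== Notes on version B (the rewrite author's own statement) =====
-- stated objective: alternative
-- what changed: Replaces the forward pass that tracks the last non-empty index with a backward while-loop that finds the cut point from the end and stops at the first non-empty header.
import Mathlib
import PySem

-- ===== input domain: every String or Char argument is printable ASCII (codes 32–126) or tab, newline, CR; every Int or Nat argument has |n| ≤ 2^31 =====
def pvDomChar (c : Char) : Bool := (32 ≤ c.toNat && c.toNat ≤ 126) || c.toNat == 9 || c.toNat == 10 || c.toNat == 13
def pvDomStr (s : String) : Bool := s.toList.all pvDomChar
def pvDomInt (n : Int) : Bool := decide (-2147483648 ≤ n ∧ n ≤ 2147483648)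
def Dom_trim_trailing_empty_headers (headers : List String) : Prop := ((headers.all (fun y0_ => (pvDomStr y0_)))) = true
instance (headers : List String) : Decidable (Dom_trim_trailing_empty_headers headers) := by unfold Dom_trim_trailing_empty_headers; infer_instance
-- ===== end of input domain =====

-- B trims trailing empty headers by scanning backwards from the end (stopping at the
-- first non-empty header) instead of A's forward pass tracking the last non-empty index;
-- same return value, a different decomposition.

-- ===== PORT A =====
-- the forward pass: last_non_empty_index after the for-loop
def pyLastNonEmpty (headers : List String) : Int :=
  (PySem.List.enumerate headers 0).foldl
    (fun acc p => if p.2 ≠ "" then p.1 else acc) (-1)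

def trim_trailing_empty_headers (headers : List String) : List String :=
  let last := pyLastNonEmpty headers
  if last = -1 then []
  else PySem.List.slice headers none (some (last + 1))

-- ===== PORT B =====
-- the backward while-loop: i = len(headers); while i > 0 and not headers[i-1]: i -= 1
def trimCut (headers : List String) : Nat → Nat
  | 0 => 0
  | i + 1 => if headers.getD i "" = "" then trimCut headers i else i + 1

def trim_trailing_empty_headers_alt (headers : List String) : List String :=
  headers.take (trimCut headers headers.length)

-- ===== PRECONDITION & SPEC =====
def Spec_trim_trailing_empty_headers (headers : List String) (out : List String) : Prop := out = trim_trailing_empty_headers_alt headers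
instance (headers : List String) (out : List String) : Decidable (Spec_trim_trailing_empty_headers headers out) := by unfold Spec_trim_trailing_empty_headers; infer_instance

-- ===== CLAIM (what is proved, stated in full; the proofs are below) =====
def Claim_equal_trim_trailing_empty_headers : Prop := ∀ (headers : List String), Dom_trim_trailing_empty_headers headers → Spec_trim_trailing_empty_headers headers (trim_trailing_empty_headers headers)

-- ===== LEMMAS AND PROOFS =====

theorem trimCut_append (xs : List String) (x : String) :
    ∀ i, i ≤ xs.length → trimCut (xs ++ [x]) i = trimCut xs i := by
  intro i
  induction i with
  | zero => intro _; rfl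
  | succ i ih =>
    intro h
    have hi : i < xs.length := by omega
    simp only [trimCut, ih (by omega)]
    have : (xs ++ [x]).getD i "" = xs.getD i "" := by
      simp [List.getD, List.getElem?_append_left hi]
    rw [this]

theorem pyLastNonEmpty_add_one (xs : List String) :
    pyLastNonEmpty xs + 1 = (trimCut xs xs.length : Int) := by
  induction xs using List.reverseRecOn with
  | nil => simp [pyLastNonEmpty, trimCut, PySem.List.enumerate_nil]
  | append_singleton xs x ih =>
    have hlast : (xs ++ [x]).getD xs.length "" = x := by
      simp [List.getD]
    have hcut : trimCut (xs ++ [x]) (xs.length + 1)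
        = if x = "" then trimCut xs xs.length else xs.length + 1 := by
      simp only [trimCut, hlast, trimCut_append xs x xs.length le_rfl]
    have hfold : pyLastNonEmpty (xs ++ [x])
        = if x ≠ "" then (xs.length : Int) else pyLastNonEmpty xs := by
      simp [pyLastNonEmpty, PySem.List.enumerate_append, List.foldl_append,
        PySem.List.enumerate_cons, PySem.List.enumerate_nil]
    rw [List.length_append, List.length_singleton, hcut, hfold]
    by_cases hx : x = "" <;> simp [hx, ih]

theorem trim_trailing_empty_headers_spec : Claim_equal_trim_trailing_empty_headers := by
  intro headers _
  unfold Spec_trim_trailing_empty_headers trim_trailing_empty_headers trim_trailing_empty_headers_alt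
  have h := pyLastNonEmpty_add_one headers
  by_cases hneg : pyLastNonEmpty headers = -1
  · have : trimCut headers headers.length = 0 := by omega
    simp [hneg, this]
  · have hnn : 0 ≤ pyLastNonEmpty headers + 1 := by omega
    simp only [hneg, if_false]
    rw [PySem.List.slice_to _ _ , h]
    · simp
    · exact hnn
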